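-- pv_equiv track=rewrite | github.com/sswam/allemande | git/short_patches.py | parse_git_diff
-- ===== SOURCE A (Python) =====
-- from collections import defaultdict
--
-- def parse_git_diff(diff_output: str) -> dict[str, list[str]]:
--     """Parse git diff output and group patches by filename."""
--     patches = defaultdict(list)
--     current_file = None
--
--     for line in diff_output.splitlines():
--         if line.startswith("diff --git"):
--             current_file = line.split()[-1].lstrip("b/")
--         elif current_file is not None:
--             patches[current_file].append(line)
--
--     return patches
-- ===== SOURCE B (Python) =====
-- from collections import defaultdict
--
--
-- def _next_header(lines, i):
--     """Index of the next 'diff --git' header line at or after i (len(lines) if none)."""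
--     while i < len(lines) and not lines[i].startswith("diff --git"):
--         i += 1
--     return i
--
--
-- def parse_git_diff(diff_output: str) -> dict[str, list[str]]:
--     """Parse git diff output and group patches by filename."""
--     patches = defaultdict(list)
--     lines = diff_output.splitlines()
--     i = _next_header(lines, 0)
--     while i < len(lines):
--         name = lines[i].split()[-1].lstrip("b/")
--         j = _next_header(lines, i + 1)
--         if j > i + 1:
--             patches[name].extend(lines[i + 1:j])
--         i = j
--     return patches
-- ===== Notes on version B (the rewrite author's own statement) =====
-- stated objective: alternative
-- what changed: Replaces A's single stateful line scan carrying a current_file variable with a two-level chunking pass: a helper locates successive git header-line indices and each file's block of lines is attached with one slice-and-extend per file instead of one dict lookup+append per line.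
import Mathlib
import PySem

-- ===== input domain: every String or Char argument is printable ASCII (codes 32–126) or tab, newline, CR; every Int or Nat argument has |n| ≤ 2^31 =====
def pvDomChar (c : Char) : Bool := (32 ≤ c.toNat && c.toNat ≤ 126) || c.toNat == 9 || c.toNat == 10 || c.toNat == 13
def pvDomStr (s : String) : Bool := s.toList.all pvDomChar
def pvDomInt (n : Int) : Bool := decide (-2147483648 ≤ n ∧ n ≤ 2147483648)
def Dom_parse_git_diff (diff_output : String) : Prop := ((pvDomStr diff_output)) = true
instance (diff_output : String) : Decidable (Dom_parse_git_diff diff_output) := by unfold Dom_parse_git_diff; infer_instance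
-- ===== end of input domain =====

-- B replaces A's stateful line-by-line scan (a current_file variable) with a two-level chunking
-- pass over header indices, extending the dict with one whole slice per file block.

-- ===== PORT A =====
-- shared header-name expression, `line.split()[-1].lstrip("b/")` in both Pythons:
-- split() = PySem.Str.split₀; [-1] via pyGet? (on a header line the token list is nonempty, so the
-- `.getD ""` default is unreachable); lstrip("b/") ported by hand as dropWhile over {'b','/'},
-- exact for Python's char-set lstrip.
def pvHeaderName (line : String) : String :=
  let last := (PySem.List.pyGet? (PySem.Str.split₀ line) (-1)).getD ""
  String.ofList (last.toList.dropWhile (fun c => c == 'b' || c == '/'))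

-- the body of A's `for line in ...` loop (state: patches dict, current_file)
def pvStepA (st : PySem.Dict String (List String) × Option String) (line : String) :
    PySem.Dict String (List String) × Option String :=
  if PySem.Str.startswith line "diff --git" then
    (st.1, some (pvHeaderName line))
  else
    match st.2 with
    | some f => (st.1.modify f [] (· ++ [line]), st.2)  -- defaultdict: patches[f].append(line)
    | none => st

def parse_git_diff (diff_output : String) : List (String × List String) :=
  ((PySem.Str.splitlines diff_output).foldl pvStepA
    ((PySem.Dict.empty : PySem.Dict String (List String)), (none : Option String))).1.items

-- ===== PORT B =====
-- _next_header: while loop on the index, recursion on lines.length - i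
def pvNextHeader (lines : List String) (i : Nat) : Nat :=
  if i < lines.length then
    if PySem.Str.startswith (lines.getD i "") "diff --git" then i
    else pvNextHeader lines (i + 1)
  else i
termination_by lines.length - i

-- needed by pvBLoop's termination proof
theorem pvNextHeader_ge (lines : List String) (i : Nat) : i ≤ pvNextHeader lines i := by
  unfold pvNextHeader
  split
  · split
    · exact le_refl _
    · have := pvNextHeader_ge lines (i + 1); omega
  · exact le_refl _
termination_by lines.length - i

-- B's main while loop: i always points at a header line (or past the end)
def pvBLoop (lines : List String) (patches : PySem.Dict String (List String)) (i : Nat) :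
    PySem.Dict String (List String) :=
  if _h : i < lines.length then
    let name := pvHeaderName (lines.getD i "")
    let j := pvNextHeader lines (i + 1)
    let patches' :=
      if i + 1 < j then
        patches.modify name [] (· ++ PySem.List.slice lines (some ((i + 1 : Nat) : Int)) (some ((j : Nat) : Int)))
      else patches  -- defaultdict: patches[name].extend(lines[i+1:j]) only when the block is nonempty
    pvBLoop lines patches' j
  else patches
termination_by lines.length - i
decreasing_by have := pvNextHeader_ge lines (i + 1); omega

def parse_git_diff_alt (diff_output : String) : List (String × List String) :=
  let lines := PySem.Str.splitlines diff_output
  (pvBLoop lines (PySem.Dict.empty : PySem.Dict String (List String)) (pvNextHeader lines 0)).items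

-- ===== PRECONDITION & SPEC =====
def Spec_parse_git_diff (diff_output : String) (out : List (String × List String)) : Prop := out = parse_git_diff_alt diff_output
instance (diff_output : String) (out : List (String × List String)) : Decidable (Spec_parse_git_diff diff_output out) := by unfold Spec_parse_git_diff; infer_instance

-- ===== CLAIM (what is proved, stated in full; the proofs are below) =====
def Claim_equal_parse_git_diff : Prop := ∀ (diff_output : String), Dom_parse_git_diff diff_output → Spec_parse_git_diff diff_output (parse_git_diff diff_output)

-- ===== LEMMAS AND PROOFS =====

-- A's fold, projected to the dict
def pvRunA (ls : List String) (st : PySem.Dict String (List String) × Option String) :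
    PySem.Dict String (List String) :=
  (ls.foldl pvStepA st).1

theorem pvRunA_cons (x : String) (ls : List String)
    (st : PySem.Dict String (List String) × Option String) :
    pvRunA (x :: ls) st = pvRunA ls (pvStepA st x) := rfl

theorem pvDropCons (L : List String) (i : Nat) (h : i < L.length) :
    L.drop i = L.getD i "" :: L.drop (i + 1) := by
  rw [List.getD_eq_getElem L "" h]
  exact List.drop_eq_getElem_cons h

-- pvNextHeader unfolding equations
theorem pvNextHeader_eq_end (L : List String) (i : Nat) (h : ¬ i < L.length) :
    pvNextHeader L i = i := by
  unfold pvNextHeader; rw [if_neg h]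

theorem pvNextHeader_eq_self (L : List String) (i : Nat) (h : i < L.length)
    (hh : PySem.Str.startswith (L.getD i "") "diff --git" = true) :
    pvNextHeader L i = i := by
  unfold pvNextHeader; rw [if_pos h, if_pos hh]

theorem pvNextHeader_eq_succ (L : List String) (i : Nat) (h : i < L.length)
    (hh : PySem.Str.startswith (L.getD i "") "diff --git" = false) :
    pvNextHeader L i = pvNextHeader L (i + 1) := by
  conv_lhs => rw [pvNextHeader]
  rw [if_pos h, if_neg (by rw [hh]; simp)]

theorem pvNextHeader_le (L : List String) (i : Nat) (h : i ≤ L.length) :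
    pvNextHeader L i ≤ L.length := by
  unfold pvNextHeader
  split
  · split
    · omega
    · exact pvNextHeader_le L (i + 1) (by omega)
  · omega
termination_by L.length - i

theorem pvNextHeader_hdr (L : List String) (i : Nat)
    (h : pvNextHeader L i < L.length) :
    PySem.Str.startswith (L.getD (pvNextHeader L i) "") "diff --git" = true := by
  by_cases hi : i < L.length
  · by_cases hh : PySem.Str.startswith (L.getD i "") "diff --git" = true
    · rwa [pvNextHeader_eq_self L i hi hh]
    · have hh' : PySem.Str.startswith (L.getD i "") "diff --git" = false := by
        simpa using hh
      rw [pvNextHeader_eq_succ L i hi hh'] at h ⊢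
      exact pvNextHeader_hdr L (i + 1) h
  · rw [pvNextHeader_eq_end L i hi] at h; omega
termination_by L.length - i

-- before the first header, A's loop (current_file = None) changes nothing
theorem pvPrelude (L : List String) (i : Nat) (d : PySem.Dict String (List String)) :
    pvRunA (L.drop i) (d, none) = pvRunA (L.drop (pvNextHeader L i)) (d, none) := by
  by_cases h : i < L.length
  · by_cases hh : PySem.Str.startswith (L.getD i "") "diff --git" = true
    · rw [pvNextHeader_eq_self L i h hh]
    · have hh' : PySem.Str.startswith (L.getD i "") "diff --git" = false := by simpa using hh
      rw [pvNextHeader_eq_succ L i h hh', pvDropCons L i h, pvRunA_cons]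
      have hs : pvStepA (d, none) (L.getD i "") = (d, none) := by
        unfold pvStepA; rw [if_neg (by rw [hh']; simp)]
      rw [hs]
      exact pvPrelude L (i + 1) d
  · rw [pvNextHeader_eq_end L i h]
termination_by L.length - i

-- the per-line appends of one file block, as a fold
def pvExt (d : PySem.Dict String (List String)) (f : String) (b : List String) :
    PySem.Dict String (List String) :=
  b.foldl (fun d l => d.modify f [] (· ++ [l])) d

-- a nonempty block of per-line appends collapses to one extend
theorem pvExt_nonempty (f : String) (b : List String) :
    ∀ (d : PySem.Dict String (List String)) (x : String),
      pvExt d f (x :: b) = d.modify f [] (· ++ (x :: b)) := by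
  induction b with
  | nil => intro d x; rfl
  | cons y b' ih =>
    intro d x
    have h1 : pvExt d f (x :: y :: b') = pvExt (d.modify f [] (· ++ [x])) f (y :: b') := rfl
    rw [h1, ih]
    have hm : ∀ (e : PySem.Dict String (List String)) (g : List String → List String),
        e.modify f [] g = e.insert f (g (e.getD f [])) := fun _ _ => rfl
    rw [hm, hm, hm, PySem.Dict.getD_insert_self, PySem.Dict.insert_insert_self]
    simp

-- running A's loop over one file block (state: current_file = f)
theorem pvChunk (L : List String) (k : Nat) (d : PySem.Dict String (List String)) (f : String) :
    pvRunA (L.drop k) (d, some f) =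
      pvRunA (L.drop (pvNextHeader L k)) (pvExt d f ((L.take (pvNextHeader L k)).drop k), some f) := by
  by_cases h : k < L.length
  · by_cases hh : PySem.Str.startswith (L.getD k "") "diff --git" = true
    · rw [pvNextHeader_eq_self L k h hh]
      have : (L.take k).drop k = [] := by
        apply List.drop_eq_nil_of_le
        simp
      rw [this]
      rfl
    · have hh' : PySem.Str.startswith (L.getD k "") "diff --git" = false := by simpa using hh
      rw [pvNextHeader_eq_succ L k h hh', pvDropCons L k h, pvRunA_cons]
      have hs : pvStepA (d, some f) (L.getD k "") =
          (d.modify f [] (· ++ [L.getD k ""]), some f) := by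
        unfold pvStepA; rw [if_neg (by rw [hh']; simp)]
      rw [hs, pvChunk L (k + 1) _ f]
      have hj := pvNextHeader_ge L (k + 1)
      set j := pvNextHeader L (k + 1) with hjdef
      have hkj : k < (L.take j).length := by
        simp only [List.length_take]
        omega
      have hcons : (L.take j).drop k = L.getD k "" :: (L.take j).drop (k + 1) := by
        rw [pvDropCons (L.take j) k hkj]
        congr 1
        rw [List.getD_eq_getElem (L.take j) "" hkj, List.getD_eq_getElem L "" h]
        exact List.getElem_take
      rw [hcons]
      rfl
  · rw [pvNextHeader_eq_end L k h]
    have h1 : (L.take k).drop k = [] := by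
      apply List.drop_eq_nil_of_le
      simp
    rw [h1]
    rfl
termination_by L.length - k

theorem pvBLoop_eq_ge (L : List String) (d : PySem.Dict String (List String)) (i : Nat)
    (h : ¬ i < L.length) : pvBLoop L d i = d := by
  unfold pvBLoop; rw [dif_neg h]

theorem pvBLoop_eq_lt (L : List String) (d : PySem.Dict String (List String)) (i : Nat)
    (h : i < L.length) :
    pvBLoop L d i =
      pvBLoop L
        (if i + 1 < pvNextHeader L (i + 1) then
          d.modify (pvHeaderName (L.getD i "")) []
            (· ++ PySem.List.slice L (some ((i + 1 : Nat) : Int)) (some ((pvNextHeader L (i + 1) : Nat) : Int)))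
        else d)
        (pvNextHeader L (i + 1)) := by
  conv_lhs => rw [pvBLoop]
  rw [dif_pos h]

-- main induction: from any header position (or the end), A's remaining fold equals B's loop
theorem pvMain (L : List String) (i : Nat) (d : PySem.Dict String (List String)) (c : Option String)
    (hi : L.length ≤ i ∨ PySem.Str.startswith (L.getD i "") "diff --git" = true) :
    pvRunA (L.drop i) (d, c) = pvBLoop L d i := by
  by_cases h : i < L.length
  · have hh : PySem.Str.startswith (L.getD i "") "diff --git" = true := by
      rcases hi with hi | hi
      · omega
      · exact hi
    rw [pvDropCons L i h, pvRunA_cons]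
    have hs : pvStepA (d, c) (L.getD i "") = (d, some (pvHeaderName (L.getD i ""))) := by
      unfold pvStepA; rw [if_pos hh]
    rw [hs, pvChunk L (i + 1) d _]
    have hj1 := pvNextHeader_ge L (i + 1)
    have hjle := pvNextHeader_le L (i + 1) (by omega)
    set j := pvNextHeader L (i + 1) with hjdef
    have hjhi : L.length ≤ j ∨ PySem.Str.startswith (L.getD j "") "diff --git" = true := by
      by_cases hj : j < L.length
      · exact Or.inr (pvNextHeader_hdr L (i + 1) (by omega))
      · exact Or.inl (by omega)
    rw [pvMain L j _ _ hjhi, pvBLoop_eq_lt L d i h]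
    congr 1
    by_cases hlt : i + 1 < j
    · have hlen : ((L.take j).drop (i + 1)).length = j - (i + 1) := by
        simp only [List.length_drop, List.length_take]
        omega
      have hne : (L.take j).drop (i + 1) ≠ [] := by
        intro hcon
        rw [hcon] at hlen
        simp at hlen
        omega
      obtain ⟨x, rest, hb⟩ := List.exists_cons_of_ne_nil hne
      rw [hb, pvExt_nonempty, ← hb]
      rw [if_pos hlt, PySem.List.slice_natCast]
      congr 2
      rw [List.drop_take]
    · have hj' : j = i + 1 := by omega
      have h1 : (L.take j).drop (i + 1) = [] := by
        apply List.drop_eq_nil_of_le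
        simp only [List.length_take]
        omega
      rw [h1, if_neg hlt]
      rfl
  · rw [pvBLoop_eq_ge L d i h]
    have : L.drop i = [] := List.drop_eq_nil_of_le (by omega)
    rw [this]
    rfl
termination_by L.length - i
decreasing_by omega

-- ===== VERDICT (by name: the statement is the Claim_ definition above) =====
theorem parse_git_diff_spec : Claim_equal_parse_git_diff := by
  intro s _
  show parse_git_diff s = parse_git_diff_alt s
  unfold parse_git_diff parse_git_diff_alt
  congr 1
  have h0 : pvRunA (PySem.Str.splitlines s) ((PySem.Dict.empty : PySem.Dict String (List String)), none) =
      pvBLoop (PySem.Str.splitlines s) (PySem.Dict.empty : PySem.Dict String (List String))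
        (pvNextHeader (PySem.Str.splitlines s) 0) := by
    set L := PySem.Str.splitlines s with hL
    have hp := pvPrelude L 0 (PySem.Dict.empty : PySem.Dict String (List String))
    rw [List.drop_zero] at hp
    rw [hp]
    apply pvMain
    by_cases hj : pvNextHeader L 0 < L.length
    · exact Or.inr (pvNextHeader_hdr L 0 hj)
    · exact Or.inl (by omega)
  exact h0
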